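-- pv_equiv track=rewrite | github.com/dquangv/LeetCode | 3851-find-sum-of-array-product-of-magical-sequences/find-sum-of-array-product-of-magical-sequences.py | magicalSum
-- ===== SOURCE A (Python) =====
-- from typing import List
--
-- def magicalSum(M: int, K: int, nums: List[int]) -> int:
--     mod = 10**9 + 7
--     n = len(nums)
--     B = n + max(M.bit_length(), 1)
--     f = [1] * (M + 1)
--     for i in range(1, M + 1):
--         f[i] = f[i - 1] * i % mod
--     invf = [1] * (M + 1)
--     invf[M] = pow(f[M], mod - 2, mod)
--     for i in range(M, 0, -1):
--         invf[i - 1] = invf[i] * i % mod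
--     pw = [[1] * (M + 1) for _ in range(n)]
--     for i in range(n):
--         for c in range(1, M + 1):
--             pw[i][c] = pw[i][c - 1] * nums[i] % mod
--     dp = [[[0] * (M + 1) for _ in range(K + 1)] for __ in range(M + 1)]
--     dp[0][0][0] = 1
--     for j in range(B):
--         ndp = [[[0] * (M + 1) for _ in range(K + 1)] for __ in range(M + 1)]
--         if j < n:
--             for carry in range(M + 1):
--                 for ones in range(K + 1):
--                     for s in range(M + 1):
--                         v = dp[carry][ones][s]
--                         if not v:
--                             continue
--                         for c in range(M - s + 1):
--                             nc = s + c
--                             sj = c + carry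
--                             b = sj & 1
--                             ncarr = sj >> 1
--                             no = ones + b
--                             if no > K:
--                                 continue
--                             val = v * invf[c] % mod * pw[j][c] % mod
--                             ndp[ncarr][no][nc] = (ndp[ncarr][no][nc] + val) % mod
--         else:
--             for carry in range(M + 1):
--                 for ones in range(K + 1):
--                     for s in range(M + 1):
--                         v = dp[carry][ones][s]
--                         if not v:
--                             continue
--                         sj = carry
--                         b = sj & 1
--                         ncarr = sj >> 1
--                         no = ones + b
--                         if no > K:
--                             continue
--                         ndp[ncarr][no][s] = (ndp[ncarr][no][s] + v) % mod
--         dp = ndp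
--     return dp[0][K][M] * f[M] % mod
-- ===== SOURCE B (Python) =====
-- from typing import List
--
-- def magicalSum(M: int, K: int, nums: List[int]) -> int:
--     # Sparse DP: a dict keyed by (carry, ones, chosen) replaces the dense 3-D
--     # tables, and a closed-form popcount filter replaces the carry-resolution phases.
--     mod = 10**9 + 7
--     n = len(nums)
--     f = [1] * (M + 1)
--     for i in range(1, M + 1):
--         f[i] = f[i - 1] * i % mod
--     invf = [1] * (M + 1)
--     invf[M] = pow(f[M], mod - 2, mod)
--     for i in range(M, 0, -1):
--         invf[i - 1] = invf[i] * i % mod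
--     pw = [[1] * (M + 1) for _ in range(n)]
--     for i in range(n):
--         for c in range(1, M + 1):
--             pw[i][c] = pw[i][c - 1] * nums[i] % mod
--     dp = {(0, 0, 0): 1}
--     for j in range(n):
--         ndp = {}
--         for (carry, ones, s), v in dp.items():
--             for c in range(M - s + 1):
--                 sj = c + carry
--                 no = ones + (sj & 1)
--                 if no > K:
--                     continue
--                 key = (sj >> 1, no, s + c)
--                 val = v * invf[c] % mod * pw[j][c] % mod
--                 ndp[key] = (ndp.get(key, 0) + val) % mod
--         dp = ndp
--     ans = 0
--     for (carry, ones, s), v in dp.items():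
--         if s == M and ones + carry.bit_count() == K:
--             ans = (ans + v) % mod
--     return ans * f[M] % mod
-- ===== Notes on version B (the rewrite author's own statement) =====
-- stated objective: alternative
-- what changed: B replaces A's dense 3-D DP tables and its max(M.bit_length(),1) trailing carry-resolution phases by a sparse dict keyed by (carry, ones, chosen) iterated over its items, and reads the answer off in one pass with the closed-form filter s == M and ones + popcount(carry) == K.
import Mathlib
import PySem

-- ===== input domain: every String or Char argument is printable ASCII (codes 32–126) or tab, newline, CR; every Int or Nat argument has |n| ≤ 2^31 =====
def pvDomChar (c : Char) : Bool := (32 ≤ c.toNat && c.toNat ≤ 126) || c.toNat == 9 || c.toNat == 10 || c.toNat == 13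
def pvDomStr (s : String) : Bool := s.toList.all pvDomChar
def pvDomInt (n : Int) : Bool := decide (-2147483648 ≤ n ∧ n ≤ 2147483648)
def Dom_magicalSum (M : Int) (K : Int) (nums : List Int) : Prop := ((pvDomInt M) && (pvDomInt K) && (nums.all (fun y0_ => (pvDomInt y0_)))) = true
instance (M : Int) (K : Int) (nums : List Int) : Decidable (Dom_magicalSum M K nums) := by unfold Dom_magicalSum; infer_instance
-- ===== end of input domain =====

-- B replaces A's dense 3-D DP tables and trailing carry-resolution phases by a sparse
-- dict keyed by (carry, ones, chosen) and a closed-form popcount readout; objective: alternative.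
-- Python's 3-d zero-initialised lists are modeled as nested Lean lists; exact on the
-- in-range indices the loops read and write.


-- ===== PORT A =====
def pvMod : Int := 1000000007

-- f[i] = f[i-1] * i % mod, built by the same recurrence
def pvFact : Nat → Int
  | 0 => 1
  | i + 1 => pvFact i * (↑i + 1) % pvMod

-- pow(b, e, m): fast modular exponentiation, value-equal to Python's three-argument pow
-- for e ≥ 0, m > 0 (PySem.Int.powMod is the unreduced b^e % m, not evaluable at e = 10^9+5)
def pvPowMod (b : Int) (e : Nat) (m : Int) : Int :=
  if e = 0 then 1 % m
  else
    let h := pvPowMod b (e / 2) m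
    if e % 2 = 0 then h * h % m else h * h % m * (b % m) % m
decreasing_by exact Nat.div_lt_self (Nat.pos_of_ne_zero (by assumption)) (by omega)

-- pvInvf m d = invf[m - d]: invf[M] = pow(f[M], mod-2, mod); invf[i-1] = invf[i] * i % mod
def pvInvf (m : Nat) : Nat → Int
  | 0 => pvPowMod (pvFact m) 1000000005 pvMod
  | d + 1 => pvInvf m d * (↑m - ↑d) % pvMod

-- pw[j][c] = pw[j][c-1] * nums[j] % mod  (j < len(nums) in every use)
def pvPw (nums : List Int) (j : Nat) : Nat → Int
  | 0 => 1
  | c + 1 => pvPw nums j c * nums.getD j 0 % pvMod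

-- Python's 3-d lists are nested Lean lists; a[i][j][l] reads/writes via getD / modify
def pvGet (t : List (List (List Int))) (a b c : Nat) : Int :=
  ((t.getD a []).getD b []).getD c 0

-- ndp[a][b][c] = (ndp[a][b][c] + v) % mod
def pvUpd (key : Nat × Nat × Nat) (v : Int) (t : List (List (List Int))) : List (List (List Int)) :=
  t.modify key.1 (fun r => r.modify key.2.1 (fun q => q.modify key.2.2 (fun x => (x + v) % pvMod)))

-- [[[0]*(M+1) for _ in range(K+1)] for __ in range(M+1)]
def pvZeros (m k : Nat) : List (List (List Int)) :=
  List.replicate (m + 1) (List.replicate (k + 1) (List.replicate (m + 1) (0 : Int)))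

-- dp = zeros; dp[0][0][0] = 1
def pvInit (m k : Nat) : List (List (List Int)) :=
  (pvZeros m k).modify 0 (fun r => r.modify 0 (fun q => q.modify 0 (fun _ => 1)))

-- one j < n phase of the DP (the number phase), loops in source order
def pvNumPhase (m k : Nat) (nums : List Int) (j : Nat) (dp : List (List (List Int))) :
    List (List (List Int)) :=
  (List.range (m + 1)).foldl (fun ndp carry =>
    (List.range (k + 1)).foldl (fun ndp ones =>
      (List.range (m + 1)).foldl (fun ndp s =>
        let v := pvGet dp carry ones s
        if v = 0 then ndp else
        (List.range (m - s + 1)).foldl (fun ndp c =>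
          let nc := s + c
          let sj := c + carry
          let b := sj % 2
          let ncarr := sj / 2
          let no := ones + b
          if k < no then ndp else
          let val := v * pvInvf m (m - c) % pvMod * pvPw nums j c % pvMod
          pvUpd (ncarr, no, nc) val ndp) ndp) ndp) ndp) (pvZeros m k)

-- one j >= n phase (carry-resolution phase)
def pvTailPhase (m k : Nat) (dp : List (List (List Int))) : List (List (List Int)) :=
  (List.range (m + 1)).foldl (fun ndp carry =>
    (List.range (k + 1)).foldl (fun ndp ones =>
      (List.range (m + 1)).foldl (fun ndp s =>
        let v := pvGet dp carry ones s
        if v = 0 then ndp else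
        let b := carry % 2
        let ncarr := carry / 2
        let no := ones + b
        if k < no then ndp else
        pvUpd (ncarr, no, s) v ndp) ndp) ndp) (pvZeros m k)

-- M, K ≥ 0 under Pre_, so .toNat is exact there
def magicalSum (M : Int) (K : Int) (nums : List Int) : Int :=
  let m := M.toNat
  let k := K.toNat
  let n := nums.length
  let B := n + max (PySem.Int.bitLength M) 1
  let dp := (List.range B).foldl
    (fun dp j => if j < n then pvNumPhase m k nums j dp else pvTailPhase m k dp) (pvInit m k)
  pvGet dp 0 k m * pvFact m % pvMod

-- ===== PORT B =====
-- (B's Python builds the same factorial / inverse-factorial / power tables, so its port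
-- carries its own copies of those table helpers; the DP itself is a sparse dict.)
def pvModB : Int := 1000000007

def pvFactB : Nat → Int
  | 0 => 1
  | i + 1 => pvFactB i * (↑i + 1) % pvModB

def pvPowModB (b : Int) (e : Nat) (m : Int) : Int :=
  if e = 0 then 1 % m
  else
    let h := pvPowModB b (e / 2) m
    if e % 2 = 0 then h * h % m else h * h % m * (b % m) % m
decreasing_by exact Nat.div_lt_self (Nat.pos_of_ne_zero (by assumption)) (by omega)

def pvInvfB (m : Nat) : Nat → Int
  | 0 => pvPowModB (pvFactB m) 1000000005 pvModB
  | d + 1 => pvInvfB m d * (↑m - ↑d) % pvModB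

def pvPwB (nums : List Int) (j : Nat) : Nat → Int
  | 0 => 1
  | c + 1 => pvPwB nums j c * nums.getD j 0 % pvModB

-- one j-phase over the sparse dict: for (carry, ones, s), v in dp.items(): for c in range(M-s+1): …
def pvPhaseB (m k : Nat) (nums : List Int) (j : Nat)
    (dp : PySem.Dict (Nat × Nat × Nat) Int) : PySem.Dict (Nat × Nat × Nat) Int :=
  dp.items.foldl (fun ndp it =>
    (List.range (m - it.1.2.2 + 1)).foldl (fun ndp c =>
      let sj := c + it.1.1
      let no := it.1.2.1 + sj % 2
      if k < no then ndp else
      let key := (sj / 2, no, it.1.2.2 + c)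
      let val := it.2 * pvInvfB m (m - c) % pvModB * pvPwB nums j c % pvModB
      ndp.insert key ((ndp.getD key 0 + val) % pvModB)) ndp) PySem.Dict.empty

def magicalSum_alt (M : Int) (K : Int) (nums : List Int) : Int :=
  let m := M.toNat
  let k := K.toNat
  let dp := (List.range nums.length).foldl (fun dp j => pvPhaseB m k nums j dp)
    (PySem.Dict.empty.insert (0, 0, 0) 1)
  let ans := dp.items.foldl (fun ans it =>
    if it.1.2.2 = m ∧ it.1.2.1 + PySem.Int.bitCount (↑it.1.1 : Int) = k
    then (ans + it.2) % pvModB else ans) 0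
  ans * pvFactB m % pvModB

-- ===== PRECONDITION & SPEC =====
-- A raises IndexError when M < 0 or K < 0 (empty/short DP tables); excluded.
def Pre_magicalSum (M : Int) (K : Int) (nums : List Int) : Prop := 0 ≤ M ∧ 0 ≤ K
instance (M : Int) (K : Int) (nums : List Int) : Decidable (Pre_magicalSum M K nums) := by
  unfold Pre_magicalSum; infer_instance

def pvWitness_magicalSum : Int × Int × List Int := (2, 1, [3])

def Spec_magicalSum (M : Int) (K : Int) (nums : List Int) (out : Int) : Prop := out = magicalSum_alt M K nums
instance (M : Int) (K : Int) (nums : List Int) (out : Int) : Decidable (Spec_magicalSum M K nums out) := by unfold Spec_magicalSum; infer_instance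

-- ===== CLAIM (what is proved, stated in full; the proofs are below) =====
def Claim_equal_magicalSum : Prop := ∀ (M : Int) (K : Int) (nums : List Int), Dom_magicalSum M K nums → Pre_magicalSum M K nums → Spec_magicalSum M K nums (magicalSum M K nums)

-- ===== LEMMAS AND PROOFS =====

-- B's table helpers equal A's
theorem pvModB_eq : pvModB = pvMod := rfl

theorem pvFactB_eq : pvFactB = pvFact := by
  funext n
  induction n with
  | zero => rfl
  | succ i ih => rw [pvFactB, pvFact, ih, pvModB_eq]

theorem pvPowModB_eq : pvPowModB = pvPowMod := by
  funext b e m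
  induction e using Nat.strong_induction_on with
  | _ e ih =>
    rw [pvPowModB, pvPowMod]
    by_cases h : e = 0
    · simp [h]
    · simp only [if_neg h, ih (e / 2) (Nat.div_lt_self (Nat.pos_of_ne_zero h) (by omega))]

theorem pvInvfB_eq : pvInvfB = pvInvf := by
  funext m d
  induction d with
  | zero => rw [pvInvfB, pvInvf, pvPowModB_eq, pvFactB_eq, pvModB_eq]
  | succ d ih => rw [pvInvfB, pvInvf, ih, pvModB_eq]

theorem pvPwB_eq : pvPwB = pvPw := by
  funext nums j c
  induction c with
  | zero => rfl
  | succ c ih => rw [pvPwB, pvPw, ih, pvModB_eq]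

-- function-space mirror of the 3-d tables, used only by the proofs
def pvUpdF (key : Nat × Nat × Nat) (v : Int) (g : Nat → Nat → Nat → Int) : Nat → Nat → Nat → Int :=
  fun a b c => if (a, b, c) = key then (g a b c + v) % pvMod else g a b c

def pvZeroF : Nat → Nat → Nat → Int := fun _ _ _ => 0

-- dp = zeros; dp[0][0][0] = 1
def pvInitF : Nat → Nat → Nat → Int := fun a b c => if (a, b, c) = (0, 0, 0) then 1 else 0

-- one j < n phase of the DP (the number phase), loops in source order
def pvNumPhaseF (m k : Nat) (nums : List Int) (j : Nat) (dp : Nat → Nat → Nat → Int) :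
    Nat → Nat → Nat → Int :=
  (List.range (m + 1)).foldl (fun ndp carry =>
    (List.range (k + 1)).foldl (fun ndp ones =>
      (List.range (m + 1)).foldl (fun ndp s =>
        let v := dp carry ones s
        if v = 0 then ndp else
        (List.range (m - s + 1)).foldl (fun ndp c =>
          let nc := s + c
          let sj := c + carry
          let b := sj % 2
          let ncarr := sj / 2
          let no := ones + b
          if k < no then ndp else
          let val := v * pvInvf m (m - c) % pvMod * pvPw nums j c % pvMod
          pvUpdF (ncarr, no, nc) val ndp) ndp) ndp) ndp) pvZeroF

-- one j ≥ n phase (carry-resolution phase)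
def pvTailPhaseF (m k : Nat) (dp : Nat → Nat → Nat → Int) : Nat → Nat → Nat → Int :=
  (List.range (m + 1)).foldl (fun ndp carry =>
    (List.range (k + 1)).foldl (fun ndp ones =>
      (List.range (m + 1)).foldl (fun ndp s =>
        let v := dp carry ones s
        if v = 0 then ndp else
        let b := carry % 2
        let ncarr := carry / 2
        let no := ones + b
        if k < no then ndp else
        pvUpdF (ncarr, no, s) v ndp) ndp) ndp) pvZeroF

def pvE (m k : Nat) (dp : Nat → Nat → Nat → Int) : Int :=
  ∑ a ∈ Finset.range (m + 1), ∑ b ∈ Finset.range (k + 1),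
    if b + PySem.Int.bitCount (↑a : Int) = k then dp a b m else 0

-- reduced-entries + carry-bounded invariant
def pvRB (m : Nat) (g : Nat → Nat → Nat → Int) : Prop :=
  (∀ a b c, g a b c % pvMod = g a b c) ∧ (∀ a b c, m < a → g a b c = 0)

theorem pvFoldPres {α β : Type} (Q : α → Prop) (l : List β) (f : α → β → α) (x : α)
    (hx : Q x) (hf : ∀ x b, b ∈ l → Q x → Q (f x b)) : Q (l.foldl f x) := by
  induction l generalizing x with
  | nil => exact hx
  | cons b l ih =>
    exact ih (f x b) (hf x b List.mem_cons_self hx) fun x c hc hx => hf x c (List.mem_cons_of_mem _ hc) hx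

theorem pvRB_upd (m : Nat) (key : Nat × Nat × Nat) (v : Int) (g : Nat → Nat → Nat → Int)
    (h : pvRB m g) (hk : key.1 ≤ m) : pvRB m (pvUpdF key v g) := by
  constructor
  · intro a b c
    unfold pvUpdF
    split
    · exact Int.emod_emod_of_dvd _ dvd_rfl
    · exact h.1 a b c
  · intro a b c hma
    unfold pvUpdF
    split
    · rename_i heq
      exact absurd hk (by cases heq; omega)
    · exact h.2 a b c hma

theorem pvRB_init (m : Nat) : pvRB m pvInitF := by
  constructor
  · intro a b c
    unfold pvInitF
    split <;> decide
  · intro a b c hma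
    unfold pvInitF
    rw [if_neg]
    intro h
    cases h
    omega

theorem pvRB_zero (m : Nat) : pvRB m pvZeroF :=
  ⟨fun _ _ _ => Int.zero_emod _, fun _ _ _ _ => rfl⟩

theorem pvRB_numPhase (m k : Nat) (nums : List Int) (j : Nat) (dp : Nat → Nat → Nat → Int) :
    pvRB m (pvNumPhaseF m k nums j dp) := by
  unfold pvNumPhaseF
  refine pvFoldPres (pvRB m) _ _ _ (pvRB_zero m) ?_
  intro g carry hcarry hg
  refine pvFoldPres (pvRB m) _ _ _ hg ?_
  intro g ones _ hg
  refine pvFoldPres (pvRB m) _ _ _ hg ?_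
  intro g s hs hg
  dsimp only
  split
  · exact hg
  refine pvFoldPres (pvRB m) _ _ _ hg ?_
  intro g c hc hg
  dsimp only
  split
  · exact hg
  refine pvRB_upd m _ _ _ hg ?_
  have h1 : carry < m + 1 := List.mem_range.1 hcarry
  have h2 : c < m - s + 1 := List.mem_range.1 hc
  show (c + carry) / 2 ≤ m
  omega

-- single fold of guarded add-mod updates, read at one cell
theorem pvFoldUpd_read {ι : Type} (l : List ι) (P : ι → Prop) [DecidablePred P]
    (key : ι → Nat × Nat × Nat) (v : ι → Int) (g₀ : Nat → Nat → Nat → Int)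
    (a b c : Nat) (h : g₀ a b c % pvMod = g₀ a b c) :
    (l.foldl (fun g i => if P i then pvUpdF (key i) (v i) g else g) g₀) a b c
      = (g₀ a b c + (l.map (fun i => if P i ∧ key i = (a, b, c) then v i else 0)).sum) % pvMod := by
  induction l generalizing g₀ with
  | nil => simpa using h.symm
  | cons i l ih =>
    simp only [List.foldl_cons, List.map_cons, List.sum_cons]
    have h1 : (if P i then pvUpdF (key i) (v i) g₀ else g₀) a b c
        = if P i ∧ key i = (a, b, c) then (g₀ a b c + v i) % pvMod else g₀ a b c := by
      by_cases hP : P i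
      · simp only [if_pos hP]
        unfold pvUpdF
        by_cases hk : (a, b, c) = key i
        · rw [if_pos hk, if_pos ⟨hP, hk.symm⟩]
        · rw [if_neg hk, if_neg (fun hc => hk hc.2.symm)]
      · simp [hP]
    have h2 : (if P i then pvUpdF (key i) (v i) g₀ else g₀) a b c % pvMod
        = (if P i then pvUpdF (key i) (v i) g₀ else g₀) a b c := by
      rw [h1]
      split
      · exact Int.emod_emod_of_dvd _ dvd_rfl
      · exact h
    rw [ih _ h2, h1]
    split
    · rw [Int.emod_add_emod, add_assoc]
    · rw [zero_add]

-- scalar fold of guarded add-mods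
theorem pvFoldAdd {ι : Type} (l : List ι) (P : ι → Prop) [DecidablePred P]
    (v : ι → Int) (a₀ : Int) (h : a₀ % pvMod = a₀) :
    l.foldl (fun a i => if P i then (a + v i) % pvMod else a) a₀
      = (a₀ + (l.map (fun i => if P i then v i else 0)).sum) % pvMod := by
  induction l generalizing a₀ with
  | nil => simpa using h.symm
  | cons i l ih =>
    simp only [List.foldl_cons, List.map_cons, List.sum_cons]
    have h2 : (if P i then (a₀ + v i) % pvMod else a₀) % pvMod
        = (if P i then (a₀ + v i) % pvMod else a₀) := by
      split
      · exact Int.emod_emod_of_dvd _ dvd_rfl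
      · exact h
    rw [ih _ h2]
    split
    · rw [Int.emod_add_emod, add_assoc]
    · rw [zero_add]

-- two nested foldls are one foldl over the pair list
theorem pvFoldNest {α β γ : Type} (l : List β) (f : β → List γ) (step : α → β → γ → α) (x : α) :
    l.foldl (fun x b => (f b).foldl (fun x c => step x b c) x) x
      = (l.flatMap (fun b => (f b).map (fun c => (b, c)))).foldl (fun x p => step x p.1 p.2) x := by
  induction l generalizing x with
  | nil => rfl
  | cons b l ih => simp [List.foldl_append, List.foldl_map, ih]

theorem pvSumMapFlatMap {β γ : Type} (l : List β) (f : β → List γ) (h : γ → Int) :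
    ((l.flatMap f).map h).sum = (l.map (fun b => ((f b).map h).sum)).sum := by
  induction l with
  | nil => rfl
  | cons b l ih => simp [List.flatMap_cons, List.map_append, List.sum_append, ih]

theorem pvSumMapRange (n : Nat) (h : Nat → Int) :
    ((List.range n).map h).sum = ∑ i ∈ Finset.range n, h i := by
  induction n with
  | zero => rfl
  | succ n ih => rw [List.range_succ, Finset.sum_range_succ, List.map_append, List.sum_append, ih]; simp

-- the value of one carry-resolution phase at a cell
theorem pvTail_read (m k : Nat) (dp : Nat → Nat → Nat → Int) (a b c : Nat) :
    pvTailPhaseF m k dp a b c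
      = (∑ carry ∈ Finset.range (m + 1), ∑ ones ∈ Finset.range (k + 1),
          ∑ s ∈ Finset.range (m + 1),
          if (¬ dp carry ones s = 0 ∧ ones + carry % 2 ≤ k ∧
              carry / 2 = a ∧ ones + carry % 2 = b ∧ s = c) then dp carry ones s else 0) % pvMod := by
  unfold pvTailPhaseF
  rw [pvFoldNest, pvFoldNest,
    List.foldl_ext _ (fun g q =>
      if (¬ dp q.1.1 q.1.2 q.2 = 0 ∧ q.1.2 + q.1.1 % 2 ≤ k) then
        pvUpdF (q.1.1 / 2, q.1.2 + q.1.1 % 2, q.2) (dp q.1.1 q.1.2 q.2) g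
      else g) _
      (by
        intro g q _
        dsimp only
        by_cases h1 : dp q.1.1 q.1.2 q.2 = 0
        · simp [h1]
        · by_cases h2 : k < q.1.2 + q.1.1 % 2
          · simp [h1, h2, Nat.not_le.2 h2]
          · simp [h1, h2, Nat.not_lt.1 h2])]
  rw [pvFoldUpd_read (ι := (Nat × Nat) × Nat) (P := fun q => ¬ dp q.1.1 q.1.2 q.2 = 0 ∧ q.1.2 + q.1.1 % 2 ≤ k)
      (key := fun q => (q.1.1 / 2, q.1.2 + q.1.1 % 2, q.2)) (v := fun q => dp q.1.1 q.1.2 q.2)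
      (g₀ := pvZeroF) (a := a) (b := b) (c := c) _ (Int.zero_emod _)]
  rw [show pvZeroF a b c = 0 from rfl, zero_add]
  congr 1
  rw [pvSumMapFlatMap]
  simp only [List.map_map, Function.comp_def, pvSumMapRange, pvSumMapFlatMap]
  refine Finset.sum_congr rfl fun carry _ => Finset.sum_congr rfl fun ones _ =>
    Finset.sum_congr rfl fun s _ => ?_
  refine if_congr ?_ rfl rfl
  simp only [Prod.mk.injEq]
  tauto

theorem pvSumCollapse (n s₀ : Nat) (h : s₀ < n) (P : Nat → Prop) [DecidablePred P] (f : Nat → Int) :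
    (∑ s ∈ Finset.range n, if P s ∧ s = s₀ then f s else 0) = if P s₀ then f s₀ else 0 := by
  rw [Finset.sum_eq_single_of_mem s₀ (Finset.mem_range.2 h)]
  · simp
  · intro s _ hs
    rw [if_neg]
    rintro ⟨-, rfl⟩
    exact hs rfl

theorem pvSumCollapse' (n s₀ : Nat) (h : s₀ < n) (P : Nat → Prop) [DecidablePred P] (f : Nat → Int) :
    (∑ s ∈ Finset.range n, if P s ∧ s₀ = s then f s else 0) = if P s₀ then f s₀ else 0 := by
  rw [Finset.sum_eq_single_of_mem s₀ (Finset.mem_range.2 h)]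
  · simp
  · intro s _ hs
    rw [if_neg]
    rintro ⟨-, rfl⟩
    exact hs rfl

theorem pvSumMod2 {α β : Type} (s : Finset α) (t : Finset β) (f : α → β → Int) :
    (∑ a ∈ s, ∑ b ∈ t, f a b % pvMod) % pvMod = (∑ a ∈ s, ∑ b ∈ t, f a b) % pvMod := by
  rw [Finset.sum_int_mod s pvMod (fun a => ∑ b ∈ t, f a b % pvMod)]
  conv_rhs => rw [Finset.sum_int_mod]
  congr 1
  refine Finset.sum_congr rfl fun a _ => ?_
  exact (Finset.sum_int_mod t pvMod (f a)).symm

theorem pvSumComm4 {s1 s2 s3 s4 : Finset Nat} (f : Nat → Nat → Nat → Nat → Int) :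
    (∑ a ∈ s1, ∑ b ∈ s2, ∑ c ∈ s3, ∑ o ∈ s4, f a b c o)
      = ∑ c ∈ s3, ∑ o ∈ s4, ∑ a ∈ s1, ∑ b ∈ s2, f a b c o :=
  calc (∑ a ∈ s1, ∑ b ∈ s2, ∑ c ∈ s3, ∑ o ∈ s4, f a b c o)
      = ∑ a ∈ s1, ∑ c ∈ s3, ∑ b ∈ s2, ∑ o ∈ s4, f a b c o :=
        Finset.sum_congr rfl fun a _ => Finset.sum_comm
    _ = ∑ c ∈ s3, ∑ a ∈ s1, ∑ b ∈ s2, ∑ o ∈ s4, f a b c o := Finset.sum_comm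
    _ = ∑ c ∈ s3, ∑ a ∈ s1, ∑ o ∈ s4, ∑ b ∈ s2, f a b c o :=
        Finset.sum_congr rfl fun c _ => Finset.sum_congr rfl fun a _ => Finset.sum_comm
    _ = ∑ c ∈ s3, ∑ o ∈ s4, ∑ a ∈ s1, ∑ b ∈ s2, f a b c o :=
        Finset.sum_congr rfl fun c _ => Finset.sum_comm

theorem pvBitCount_halve (c : Nat) :
    PySem.Int.bitCount (↑c : Int) = c % 2 + PySem.Int.bitCount ((c / 2 : Nat) : Int) := by
  rcases Nat.eq_zero_or_pos c with h | h
  · subst h; simp [PySem.Int.bitCount_zero]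
  · exact PySem.Int.bitCount_natCast h

-- one carry-resolution phase leaves the final aggregate unchanged (mod pvMod)
theorem pvTail_E (m k : Nat) (dp : Nat → Nat → Nat → Int) :
    pvE m k (pvTailPhaseF m k dp) % pvMod = pvE m k dp % pvMod := by
  have step1 : pvE m k (pvTailPhaseF m k dp)
      = ∑ a ∈ Finset.range (m + 1), ∑ b ∈ Finset.range (k + 1),
          ((∑ c ∈ Finset.range (m + 1), ∑ o ∈ Finset.range (k + 1), ∑ s ∈ Finset.range (m + 1),
            if (b + PySem.Int.bitCount (↑a : Int) = k ∧ ¬ dp c o s = 0 ∧ o + c % 2 ≤ k ∧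
                c / 2 = a ∧ o + c % 2 = b ∧ s = m) then dp c o s else 0) % pvMod) := by
    unfold pvE
    refine Finset.sum_congr rfl fun a _ => Finset.sum_congr rfl fun b _ => ?_
    rw [pvTail_read]
    by_cases hphi : b + PySem.Int.bitCount (↑a : Int) = k
    · rw [if_pos hphi]
      congr 1
      refine Finset.sum_congr rfl fun c _ => Finset.sum_congr rfl fun o _ =>
        Finset.sum_congr rfl fun s _ => ?_
      exact if_congr (by simp [hphi]) rfl rfl
    · rw [if_neg hphi]
      have : ∀ c o s, (if (b + PySem.Int.bitCount (↑a : Int) = k ∧ ¬ dp c o s = 0 ∧ o + c % 2 ≤ k ∧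
          c / 2 = a ∧ o + c % 2 = b ∧ s = m) then dp c o s else 0) = 0 := by
        intro c o s
        rw [if_neg]
        rintro ⟨h1, -⟩
        exact hphi h1
      simp [this]
  rw [step1, pvSumMod2]
  congr 1
  -- collapse the s-sum at s = m
  have step3 : (∑ a ∈ Finset.range (m + 1), ∑ b ∈ Finset.range (k + 1),
        ∑ c ∈ Finset.range (m + 1), ∑ o ∈ Finset.range (k + 1), ∑ s ∈ Finset.range (m + 1),
          if (b + PySem.Int.bitCount (↑a : Int) = k ∧ ¬ dp c o s = 0 ∧ o + c % 2 ≤ k ∧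
              c / 2 = a ∧ o + c % 2 = b ∧ s = m) then dp c o s else 0)
      = ∑ a ∈ Finset.range (m + 1), ∑ b ∈ Finset.range (k + 1),
        ∑ c ∈ Finset.range (m + 1), ∑ o ∈ Finset.range (k + 1),
          if (b + PySem.Int.bitCount (↑a : Int) = k ∧ ¬ dp c o m = 0 ∧ o + c % 2 ≤ k ∧
              c / 2 = a ∧ o + c % 2 = b) then dp c o m else 0 := by
    refine Finset.sum_congr rfl fun a _ => Finset.sum_congr rfl fun b _ =>
      Finset.sum_congr rfl fun c _ => Finset.sum_congr rfl fun o _ => ?_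
    rw [show (∑ s ∈ Finset.range (m + 1),
          if (b + PySem.Int.bitCount (↑a : Int) = k ∧ ¬ dp c o s = 0 ∧ o + c % 2 ≤ k ∧
              c / 2 = a ∧ o + c % 2 = b ∧ s = m) then dp c o s else 0)
        = ∑ s ∈ Finset.range (m + 1),
          if ((b + PySem.Int.bitCount (↑a : Int) = k ∧ ¬ dp c o s = 0 ∧ o + c % 2 ≤ k ∧
              c / 2 = a ∧ o + c % 2 = b) ∧ s = m) then dp c o s else 0 from
      Finset.sum_congr rfl fun s _ => if_congr (by tauto) rfl rfl]
    exact pvSumCollapse (m + 1) m (by omega) _ _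
  rw [step3, pvSumComm4]
  refine Finset.sum_congr rfl fun c hc => Finset.sum_congr rfl fun o _ => ?_
  have hcm : c ≤ m := by have := Finset.mem_range.1 hc; omega
  by_cases hdp : dp c o m = 0
  · simp [hdp]
  by_cases hno : o + c % 2 ≤ k
  · -- collapse b at o + c % 2, then a at c / 2
    have hb : o + c % 2 < k + 1 := by omega
    have hcol : (∑ a ∈ Finset.range (m + 1), ∑ b ∈ Finset.range (k + 1),
          if (b + PySem.Int.bitCount (↑a : Int) = k ∧ ¬ dp c o m = 0 ∧ o + c % 2 ≤ k ∧
              c / 2 = a ∧ o + c % 2 = b) then dp c o m else 0)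
        = ∑ a ∈ Finset.range (m + 1),
          if ((o + c % 2 + PySem.Int.bitCount (↑a : Int) = k ∧ ¬ dp c o m = 0 ∧ o + c % 2 ≤ k) ∧
              c / 2 = a) then dp c o m else 0 := by
      refine Finset.sum_congr rfl fun a _ => ?_
      rw [show (∑ b ∈ Finset.range (k + 1),
            if (b + PySem.Int.bitCount (↑a : Int) = k ∧ ¬ dp c o m = 0 ∧ o + c % 2 ≤ k ∧
                c / 2 = a ∧ o + c % 2 = b) then dp c o m else 0)
          = ∑ b ∈ Finset.range (k + 1),
            if ((b + PySem.Int.bitCount (↑a : Int) = k ∧ ¬ dp c o m = 0 ∧ o + c % 2 ≤ k ∧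
                c / 2 = a) ∧ o + c % 2 = b) then dp c o m else 0 from
        Finset.sum_congr rfl fun b _ => if_congr (by tauto) rfl rfl]
      rw [pvSumCollapse' (k + 1) (o + c % 2) hb _ _]
      exact if_congr (by tauto) rfl rfl
    rw [hcol, pvSumCollapse' (m + 1) (c / 2) (by omega) _ _]
    have hbc := pvBitCount_halve c
    refine if_congr ?_ rfl rfl
    constructor
    · rintro ⟨h1, -, -⟩
      omega
    · intro h1
      refine ⟨by omega, hdp, by omega⟩
  · -- o + c % 2 > k: both sides vanish
    have hz : ∀ a ∈ Finset.range (m + 1), (∑ b ∈ Finset.range (k + 1),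
        if (b + PySem.Int.bitCount (↑a : Int) = k ∧ ¬ dp c o m = 0 ∧ o + c % 2 ≤ k ∧
            c / 2 = a ∧ o + c % 2 = b) then dp c o m else 0) = 0 := by
      intro a _
      refine Finset.sum_eq_zero fun b _ => ?_
      rw [if_neg]
      rintro ⟨-, -, h3, -⟩
      exact hno h3
    rw [Finset.sum_eq_zero hz, if_neg]
    have hbc := pvBitCount_halve c
    omega

-- iterated carry-resolution resolves every carry: the closed form
theorem pvML (m k : Nat) : ∀ (t : Nat) (dp : Nat → Nat → Nat → Int),
    (∀ a b c, dp a b c % pvMod = dp a b c) →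
    (∀ a b c, 2 ^ t ≤ a ∨ m < a → dp a b c = 0) →
    ((pvTailPhaseF m k)^[t] dp) 0 k m = pvE m k dp % pvMod := by
  intro t
  induction t with
  | zero =>
    intro dp hred hz
    rw [Function.iterate_zero_apply]
    unfold pvE
    rw [Finset.sum_eq_single_of_mem 0 (Finset.mem_range.2 (by omega))]
    · rw [show (∑ b ∈ Finset.range (k + 1),
            if b + PySem.Int.bitCount ((0 : Nat) : Int) = k then dp 0 b m else 0)
          = ∑ b ∈ Finset.range (k + 1), if b = k then dp 0 b m else 0 from
        Finset.sum_congr rfl fun b _ => if_congr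
          (by simp [PySem.Int.bitCount_zero]) rfl rfl]
      rw [Finset.sum_ite_eq' (Finset.range (k + 1)) k, if_pos (Finset.mem_range.2 (by omega))]
      exact (hred 0 k m).symm
    · intro a _ ha
      refine Finset.sum_eq_zero fun b _ => ?_
      rw [hz a b m (Or.inl (by omega))]
      simp
  | succ t ih =>
    intro dp hred hz
    rw [Function.iterate_succ_apply]
    have hred' : ∀ a b c, pvTailPhaseF m k dp a b c % pvMod = pvTailPhaseF m k dp a b c := by
      intro a b c
      rw [pvTail_read]
      exact Int.emod_emod_of_dvd _ dvd_rfl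
    have hz' : ∀ a b c, 2 ^ t ≤ a ∨ m < a → pvTailPhaseF m k dp a b c = 0 := by
      intro a b c ha
      rw [pvTail_read]
      rw [show (∑ carry ∈ Finset.range (m + 1), ∑ ones ∈ Finset.range (k + 1),
            ∑ s ∈ Finset.range (m + 1),
            if (¬ dp carry ones s = 0 ∧ ones + carry % 2 ≤ k ∧
                carry / 2 = a ∧ ones + carry % 2 = b ∧ s = c) then dp carry ones s else 0) = 0
        from ?_]
      · rfl
      refine Finset.sum_eq_zero fun carry _ => Finset.sum_eq_zero fun o _ =>
        Finset.sum_eq_zero fun s _ => ?_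
      rw [if_neg]
      rintro ⟨h1, -, h3, -, -⟩
      have hc1 : ¬ (2 ^ (t + 1) ≤ carry ∨ m < carry) := fun hcc => h1 (hz carry o s hcc)
      have hp : 2 ^ (t + 1) = 2 * 2 ^ t := by rw [pow_succ]; ring
      omega
    rw [ih (pvTailPhaseF m k dp) hred' hz', pvTail_E]

theorem pvIter {α : Type} (f : α → α) (t : Nat) (x : α) :
    (List.range t).foldl (fun y _ => f y) x = f^[t] x := by
  induction t with
  | zero => rfl
  | succ t ih => rw [List.range_succ, List.foldl_append, ih, Function.iterate_succ_apply']; rfl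

-- ===== list-table / function-table simulation (A's side) =====
def pvA (t : List (List (List Int))) : Nat → Nat → Nat → Int := fun a b c => pvGet t a b c

def pvDims (m k : Nat) (t : List (List (List Int))) : Prop :=
  t.length = m + 1 ∧ ∀ a, a < m + 1 →
    ((t.getD a []).length = k + 1 ∧ ∀ b, b < k + 1 → ((t.getD a []).getD b []).length = m + 1)

theorem pvGetD_modify {α : Type} (l : List α) (i : Nat) (f : α → α) (j : Nat) (d : α) :
    (l.modify i f).getD j d = if i = j ∧ j < l.length then f (l.getD j d) else l.getD j d := by
  rw [List.getD_eq_getElem?_getD, List.getElem?_modify, List.getD_eq_getElem?_getD]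
  rcases h : l[j]? with _ | x
  · have hj : ¬ j < l.length := by
      have := List.getElem?_eq_none_iff.1 h
      omega
    rw [if_neg (fun hc => hj hc.2)]
    rfl
  · have hj : j < l.length := (List.getElem?_eq_some_iff.1 h).1
    by_cases hij : i = j
    · rw [if_pos ⟨hij, hj⟩]
      simp [hij]
    · rw [if_neg (fun hc => hij hc.1)]
      simp [hij]

theorem pvGet_zeros (m k a b c : Nat) : pvGet (pvZeros m k) a b c = 0 := by
  unfold pvGet pvZeros
  by_cases ha : a < m + 1
  · rw [List.getD_replicate _ ha]
    by_cases hb : b < k + 1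
    · rw [List.getD_replicate _ hb]
      by_cases hc : c < m + 1
      · rw [List.getD_replicate _ hc]
      · rw [List.getD_eq_getElem?_getD, List.getElem?_replicate, if_neg hc]; rfl
    · rw [List.getD_eq_getElem?_getD (l := List.replicate (k+1) _), List.getElem?_replicate,
        if_neg hb]
      rfl
  · rw [List.getD_eq_getElem?_getD (l := List.replicate (m+1) _), List.getElem?_replicate,
      if_neg ha]
    rfl

theorem pvA_zeros (m k : Nat) : pvA (pvZeros m k) = pvZeroF := by
  funext a b c
  exact pvGet_zeros m k a b c

theorem pvDims_zeros (m k : Nat) : pvDims m k (pvZeros m k) := by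
  refine ⟨by rw [pvZeros]; exact List.length_replicate, fun a ha => ?_⟩
  rw [pvZeros, List.getD_replicate _ ha]
  exact ⟨List.length_replicate, fun b hb => by rw [List.getD_replicate _ hb]; exact List.length_replicate⟩

theorem pvDims_modify3 (m k i j l : Nat) (f : Int → Int) (t : List (List (List Int)))
    (h : pvDims m k t) :
    pvDims m k (t.modify i (fun r => r.modify j (fun q => q.modify l f))) := by
  obtain ⟨h1, h2⟩ := h
  refine ⟨by rw [List.length_modify, h1], fun a ha => ?_⟩
  rw [pvGetD_modify]
  split
  · obtain ⟨hr1, hr2⟩ := h2 a ha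
    refine ⟨by rw [List.length_modify, hr1], fun b hb => ?_⟩
    rw [pvGetD_modify]
    split
    · rw [List.length_modify]
      exact hr2 b hb
    · exact hr2 b hb
  · exact h2 a ha

theorem pvDims_init (m k : Nat) : pvDims m k (pvInit m k) :=
  pvDims_modify3 m k 0 0 0 _ _ (pvDims_zeros m k)

theorem pvA_upd (m k : Nat) (key : Nat × Nat × Nat) (v : Int) (t : List (List (List Int)))
    (ht : pvDims m k t) (h1 : key.1 < m + 1) (h2 : key.2.1 < k + 1) (h3 : key.2.2 < m + 1) :
    pvA (pvUpd key v t) = pvUpdF key v (pvA t) := by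
  obtain ⟨x, y, z⟩ := key
  dsimp only at h1 h2 h3
  funext a b c
  show pvGet (pvUpd (x, y, z) v t) a b c = pvUpdF (x, y, z) v (pvA t) a b c
  unfold pvGet pvUpd pvUpdF pvA
  dsimp only
  rw [pvGetD_modify]
  by_cases hax : x = a ∧ a < t.length
  · rw [if_pos hax]
    rw [pvGetD_modify]
    by_cases hby : y = b ∧ b < (t.getD a []).length
    · rw [if_pos hby]
      rw [pvGetD_modify]
      by_cases hcz : z = c ∧ c < ((t.getD a []).getD b []).length
      · rw [if_pos hcz, if_pos (by simp [Prod.mk.injEq]; omega)]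
        rfl
      · have hlen : ((t.getD a []).getD b []).length = m + 1 := by
          have := (ht.2 a (by omega)).2 b (by omega)
          exact this
        rw [if_neg hcz, if_neg (by simp [Prod.mk.injEq]; omega)]
        rfl
    · have hlen : (t.getD a []).length = k + 1 := (ht.2 a (by omega)).1
      rw [if_neg hby, if_neg (by simp [Prod.mk.injEq]; omega)]
      rfl
  · have hlen : t.length = m + 1 := ht.1
    rw [if_neg hax, if_neg (by simp [Prod.mk.injEq]; omega)]
    rfl

theorem pvSimFold {ι : Type} (m k : Nat) (l : List ι)
    (stepL : List (List (List Int)) → ι → List (List (List Int)))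
    (stepF : (Nat → Nat → Nat → Int) → ι → (Nat → Nat → Nat → Int))
    (h : ∀ t i, i ∈ l → pvDims m k t →
      pvDims m k (stepL t i) ∧ pvA (stepL t i) = stepF (pvA t) i) :
    ∀ t, pvDims m k t →
      pvDims m k (l.foldl stepL t) ∧ pvA (l.foldl stepL t) = l.foldl stepF (pvA t) := by
  induction l with
  | nil => exact fun t ht => ⟨ht, rfl⟩
  | cons i l ih =>
    intro t ht
    obtain ⟨hd, he⟩ := h t i List.mem_cons_self ht
    obtain ⟨hd2, he2⟩ := ih (fun t i hi ht' => h t i (List.mem_cons_of_mem _ hi) ht') (stepL t i) hd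
    exact ⟨hd2, by rw [List.foldl_cons, List.foldl_cons, he2, he]⟩

theorem pvNumPhase_sim (m k : Nat) (nums : List Int) (j : Nat) (t : List (List (List Int))) :
    pvDims m k (pvNumPhase m k nums j t) ∧
      pvA (pvNumPhase m k nums j t) = pvNumPhaseF m k nums j (pvA t) := by
  unfold pvNumPhase pvNumPhaseF
  rw [show (pvZeroF : Nat → Nat → Nat → Int) = pvA (pvZeros m k) from (pvA_zeros m k).symm]
  refine pvSimFold m k _ _ _ ?_ _ (pvDims_zeros m k)
  intro g carry hcarry hg
  refine pvSimFold m k _ _ _ ?_ g hg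
  intro g ones _ hg
  refine pvSimFold m k _ _ _ ?_ g hg
  intro g s hs hg
  dsimp only [pvA]
  by_cases hv : pvGet t carry ones s = 0
  · rw [if_pos hv, if_pos hv]
    exact ⟨hg, rfl⟩
  rw [if_neg hv, if_neg hv]
  refine pvSimFold m k _ _ _ ?_ g hg
  intro g c hc hg
  dsimp only [pvA]
  by_cases hno : k < ones + (c + carry) % 2
  · rw [if_pos hno, if_pos hno]
    exact ⟨hg, rfl⟩
  rw [if_neg hno, if_neg hno]
  have hb1 : carry < m + 1 := List.mem_range.1 hcarry
  have hb2 : s < m + 1 := List.mem_range.1 hs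
  have hb3 : c < m - s + 1 := List.mem_range.1 hc
  refine ⟨pvDims_modify3 m k _ _ _ _ _ hg, pvA_upd m k _ _ _ hg ?_ ?_ ?_⟩
  · show (c + carry) / 2 < m + 1
    omega
  · show ones + (c + carry) % 2 < k + 1
    omega
  · show s + c < m + 1
    omega

theorem pvTailPhase_sim (m k : Nat) (t : List (List (List Int))) :
    pvDims m k (pvTailPhase m k t) ∧ pvA (pvTailPhase m k t) = pvTailPhaseF m k (pvA t) := by
  unfold pvTailPhase pvTailPhaseF
  rw [show (pvZeroF : Nat → Nat → Nat → Int) = pvA (pvZeros m k) from (pvA_zeros m k).symm]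
  refine pvSimFold m k _ _ _ ?_ _ (pvDims_zeros m k)
  intro g carry hcarry hg
  refine pvSimFold m k _ _ _ ?_ g hg
  intro g ones _ hg
  refine pvSimFold m k _ _ _ ?_ g hg
  intro g s hs hg
  dsimp only [pvA]
  by_cases hv : pvGet t carry ones s = 0
  · rw [if_pos hv, if_pos hv]
    exact ⟨hg, rfl⟩
  rw [if_neg hv, if_neg hv]
  by_cases hno : k < ones + carry % 2
  · rw [if_pos hno, if_pos hno]
    exact ⟨hg, rfl⟩
  rw [if_neg hno, if_neg hno]
  have hb1 : carry < m + 1 := List.mem_range.1 hcarry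
  have hb2 : s < m + 1 := List.mem_range.1 hs
  refine ⟨pvDims_modify3 m k _ _ _ _ _ hg, pvA_upd m k _ _ _ hg ?_ ?_ ?_⟩
  · show carry / 2 < m + 1
    omega
  · show ones + carry % 2 < k + 1
    omega
  · exact hb2

theorem pvA_init (m k : Nat) : pvA (pvInit m k) = pvInitF := by
  funext a b c
  show pvGet (pvInit m k) a b c = pvInitF a b c
  unfold pvInit pvInitF pvGet
  rw [pvGetD_modify]
  by_cases hax : (0 : Nat) = a ∧ a < (pvZeros m k).length
  · rw [if_pos hax]
    rw [pvGetD_modify]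
    by_cases hby : (0 : Nat) = b ∧ b < ((pvZeros m k).getD a []).length
    · rw [if_pos hby]
      rw [pvGetD_modify]
      by_cases hcz : (0 : Nat) = c ∧ c < (((pvZeros m k).getD a []).getD b []).length
      · rw [if_pos hcz, if_pos (by simp [Prod.mk.injEq]; omega)]
      · obtain ⟨rfl, -⟩ := hax
        obtain ⟨rfl, -⟩ := hby
        have hdz := pvDims_zeros m k
        have hlen : (((pvZeros m k).getD 0 []).getD 0 []).length = m + 1 :=
          (hdz.2 0 (by omega)).2 0 (by omega)
        rw [if_neg hcz, if_neg (by simp [Prod.mk.injEq]; omega)]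
        exact pvGet_zeros m k 0 0 c
    · obtain ⟨rfl, -⟩ := hax
      have hdz := pvDims_zeros m k
      have hlen : ((pvZeros m k).getD 0 []).length = k + 1 := (hdz.2 0 (by omega)).1
      rw [if_neg hby, if_neg (by simp [Prod.mk.injEq]; omega)]
      exact pvGet_zeros m k 0 b c
  · have hlen : (pvZeros m k).length = m + 1 := (pvDims_zeros m k).1
    rw [if_neg hax, if_neg (by simp [Prod.mk.injEq]; omega)]
    exact pvGet_zeros m k a b c

-- ===== dict / function-table simulation (B's side) =====

-- the three-coordinate box bound on a function table
def pvBoxP (m k : Nat) (g : Nat → Nat → Nat → Int) : Prop :=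
  ∀ a b c, (m < a ∨ k < b ∨ m < c) → g a b c = 0

theorem pvBox_upd (m k : Nat) (key : Nat × Nat × Nat) (v : Int) (g : Nat → Nat → Nat → Int)
    (h : pvBoxP m k g) (h1 : key.1 ≤ m) (h2 : key.2.1 ≤ k) (h3 : key.2.2 ≤ m) :
    pvBoxP m k (pvUpdF key v g) := by
  intro a b c hout
  unfold pvUpdF
  split
  · rename_i heq
    obtain ⟨x, y, z⟩ := key
    cases heq
    dsimp only at h1 h2 h3
    omega
  · exact h a b c hout

theorem pvBox_init (m k : Nat) : pvBoxP m k pvInitF := by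
  intro a b c hout
  unfold pvInitF
  rw [if_neg]
  intro h
  cases h
  omega

theorem pvBox_zero (m k : Nat) : pvBoxP m k pvZeroF := fun _ _ _ _ => rfl

theorem pvBox_numPhase (m k : Nat) (nums : List Int) (j : Nat) (dp : Nat → Nat → Nat → Int) :
    pvBoxP m k (pvNumPhaseF m k nums j dp) := by
  unfold pvNumPhaseF
  refine pvFoldPres (pvBoxP m k) _ _ _ (pvBox_zero m k) ?_
  intro g carry hcarry hg
  refine pvFoldPres (pvBoxP m k) _ _ _ hg ?_
  intro g ones hones hg
  refine pvFoldPres (pvBoxP m k) _ _ _ hg ?_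
  intro g s hs hg
  dsimp only
  split
  · exact hg
  refine pvFoldPres (pvBoxP m k) _ _ _ hg ?_
  intro g c hc hg
  dsimp only
  split
  · exact hg
  rename_i hno
  have h1 : carry < m + 1 := List.mem_range.1 hcarry
  have h2 : s < m + 1 := List.mem_range.1 hs
  have h3 : c < m - s + 1 := List.mem_range.1 hc
  refine pvBox_upd m k _ _ _ hg ?_ ?_ ?_
  · show (c + carry) / 2 ≤ m
    omega
  · show ones + (c + carry) % 2 ≤ k
    omega
  · show s + c ≤ m
    omega

theorem pvFoldlConst {α β : Type} (l : List β) (x : α) : l.foldl (fun x _ => x) x = x := by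
  induction l <;> simp_all

-- fold of guarded add-mod dict inserts, read at one key
theorem pvDictRead {ι : Type} (l : List ι) (P : ι → Prop) [DecidablePred P]
    (key : ι → Nat × Nat × Nat) (v : ι → Int) (d₀ : PySem.Dict (Nat × Nat × Nat) Int)
    (q : Nat × Nat × Nat) (h : d₀.getD q 0 % pvMod = d₀.getD q 0) :
    (l.foldl (fun d i =>
        if P i then d.insert (key i) ((d.getD (key i) 0 + v i) % pvMod) else d) d₀).getD q 0
      = (d₀.getD q 0 + (l.map (fun i => if P i ∧ key i = q then v i else 0)).sum) % pvMod := by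
  induction l generalizing d₀ with
  | nil => simpa using h.symm
  | cons i l ih =>
    simp only [List.foldl_cons, List.map_cons, List.sum_cons]
    have h1 : (if P i then d₀.insert (key i) ((d₀.getD (key i) 0 + v i) % pvMod) else d₀).getD q 0
        = if P i ∧ key i = q then (d₀.getD q 0 + v i) % pvMod else d₀.getD q 0 := by
      by_cases hP : P i
      · simp only [if_pos hP]
        rw [PySem.Dict.getD_insert]
        by_cases hk : q = key i
        · rw [if_pos hk, if_pos ⟨hP, hk.symm⟩, hk]
        · rw [if_neg hk, if_neg (fun hc => hk hc.2.symm)]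
      · simp [hP]
    have h2 : (if P i then d₀.insert (key i) ((d₀.getD (key i) 0 + v i) % pvMod) else d₀).getD q 0 % pvMod
        = (if P i then d₀.insert (key i) ((d₀.getD (key i) 0 + v i) % pvMod) else d₀).getD q 0 := by
      rw [h1]
      split
      · exact Int.emod_emod_of_dvd _ dvd_rfl
      · exact h
    rw [ih _ h2, h1]
    split
    · rw [Int.emod_add_emod, add_assoc]
    · rw [zero_add]

-- the value of one sparse phase at a key
theorem pvPhaseB_read (m k : Nat) (nums : List Int) (j : Nat)
    (d : PySem.Dict (Nat × Nat × Nat) Int) (q : Nat × Nat × Nat) :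
    (pvPhaseB m k nums j d).getD q 0
      = (d.items.map (fun it =>
          ((List.range (m - it.1.2.2 + 1)).map (fun c =>
            if (¬ k < it.1.2.1 + (c + it.1.1) % 2 ∧
                ((c + it.1.1) / 2, it.1.2.1 + (c + it.1.1) % 2, it.1.2.2 + c) = q)
            then it.2 * pvInvf m (m - c) % pvMod * pvPw nums j c % pvMod else 0)).sum)).sum
        % pvMod := by
  unfold pvPhaseB
  rw [pvInvfB_eq, pvPwB_eq, pvModB_eq, pvFoldNest,
    List.foldl_ext _ (fun nd p =>
      if ¬ k < p.1.1.2.1 + (p.2 + p.1.1.1) % 2 then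
        nd.insert ((p.2 + p.1.1.1) / 2, p.1.1.2.1 + (p.2 + p.1.1.1) % 2, p.1.1.2.2 + p.2)
          ((nd.getD ((p.2 + p.1.1.1) / 2, p.1.1.2.1 + (p.2 + p.1.1.1) % 2, p.1.1.2.2 + p.2) 0
            + p.1.2 * pvInvf m (m - p.2) % pvMod * pvPw nums j p.2 % pvMod) % pvMod)
      else nd) _
      (by
        intro nd p _
        dsimp only
        by_cases hno : k < p.1.1.2.1 + (p.2 + p.1.1.1) % 2
        · simp [hno]
        · simp [hno])]
  rw [pvDictRead (ι := ((Nat × Nat × Nat) × Int) × Nat)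
      (P := fun p => ¬ k < p.1.1.2.1 + (p.2 + p.1.1.1) % 2)
      (key := fun p => ((p.2 + p.1.1.1) / 2, p.1.1.2.1 + (p.2 + p.1.1.1) % 2, p.1.1.2.2 + p.2))
      (v := fun p => p.1.2 * pvInvf m (m - p.2) % pvMod * pvPw nums j p.2 % pvMod)
      (d₀ := PySem.Dict.empty) (q := q) (h := by simp) (l := _)]
  rw [show (PySem.Dict.empty : PySem.Dict (Nat × Nat × Nat) Int).getD q 0 = 0 from by simp,
    zero_add]
  congr 1
  rw [pvSumMapFlatMap]
  simp only [List.map_map, Function.comp_def]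

theorem pvMk3 (q : Nat × Nat × Nat) : (q.1, q.2.1, q.2.2) = q := rfl

-- items of a Nodup-keyed dict, mapped and summed, against the full box of a mirror function
theorem pvSumItemsBox (m k : Nat) (d : PySem.Dict (Nat × Nat × Nat) Int)
    (g : Nat → Nat → Nat → Int) (hnd : d.keys.Nodup)
    (hfun : ∀ q : Nat × Nat × Nat, d.getD q 0 = g q.1 q.2.1 q.2.2)
    (hbox : pvBoxP m k g)
    (H : (Nat × Nat × Nat) → Int → Int) (hH0 : ∀ q, H q 0 = 0) :
    (d.items.map (fun it => H it.1 it.2)).sum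
      = ∑ a ∈ Finset.range (m + 1), ∑ b ∈ Finset.range (k + 1), ∑ c ∈ Finset.range (m + 1),
          H (a, b, c) (g a b c) := by
  have hzero : ∀ q : Nat × Nat × Nat, q ∉ d.keys → H q (g q.1 q.2.1 q.2.2) = 0 := by
    intro q hq
    have hc : d.contains q = false := by
      rcases hcc : d.contains q with _ | _
      · rfl
      · exact absurd ((PySem.Dict.contains_iff_mem_keys d q).1 hcc) hq
    have hg0 : g q.1 q.2.1 q.2.2 = 0 := by
      rw [← hfun q]
      exact PySem.Dict.getD_of_not_contains d 0 hc
    rw [hg0, hH0]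
  rw [PySem.Dict.items_eq_map_keys d hnd 0, List.map_map]
  have hcongr : d.keys.map ((fun it => H it.1 it.2) ∘ fun q => (q, d.getD q 0))
      = d.keys.map (fun q => H q (g q.1 q.2.1 q.2.2)) := by
    refine List.map_congr_left fun q _ => ?_
    simp only [Function.comp_def]
    rw [hfun q]
  rw [hcongr, ← List.sum_toFinset _ hnd]
  have hprod : (∑ a ∈ Finset.range (m + 1), ∑ b ∈ Finset.range (k + 1), ∑ c ∈ Finset.range (m + 1),
        H (a, b, c) (g a b c))
      = ∑ q ∈ Finset.range (m + 1) ×ˢ (Finset.range (k + 1) ×ˢ Finset.range (m + 1)),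
          H q (g q.1 q.2.1 q.2.2) := by
    rw [Finset.sum_product]
    refine Finset.sum_congr rfl fun a _ => ?_
    rw [Finset.sum_product]
  rw [hprod]
  have hTzero : ∀ q : Nat × Nat × Nat,
      q ∉ Finset.range (m + 1) ×ˢ (Finset.range (k + 1) ×ˢ Finset.range (m + 1)) →
      H q (g q.1 q.2.1 q.2.2) = 0 := by
    intro q hq
    have hout : m < q.1 ∨ k < q.2.1 ∨ m < q.2.2 := by
      by_cases h1 : m < q.1
      · exact Or.inl h1
      by_cases h2 : k < q.2.1
      · exact Or.inr (Or.inl h2)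
      by_cases h3 : m < q.2.2
      · exact Or.inr (Or.inr h3)
      exact absurd (Finset.mem_product.2 ⟨Finset.mem_range.2 (by omega),
        Finset.mem_product.2 ⟨Finset.mem_range.2 (by omega), Finset.mem_range.2 (by omega)⟩⟩) hq
    rw [hbox q.1 q.2.1 q.2.2 hout, hH0]
  have h1 : ∑ q ∈ d.keys.toFinset, H q (g q.1 q.2.1 q.2.2)
      = ∑ q ∈ d.keys.toFinset ∪ Finset.range (m + 1) ×ˢ (Finset.range (k + 1) ×ˢ Finset.range (m + 1)),
          H q (g q.1 q.2.1 q.2.2) :=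
    Finset.sum_subset Finset.subset_union_left (by
      intro q _ hq
      exact hzero q (by simpa using hq))
  have h2 : ∑ q ∈ Finset.range (m + 1) ×ˢ (Finset.range (k + 1) ×ˢ Finset.range (m + 1)),
        H q (g q.1 q.2.1 q.2.2)
      = ∑ q ∈ d.keys.toFinset ∪ Finset.range (m + 1) ×ˢ (Finset.range (k + 1) ×ˢ Finset.range (m + 1)),
          H q (g q.1 q.2.1 q.2.2) :=
    Finset.sum_subset Finset.subset_union_right (by
      intro q _ hq
      by_cases hk : q ∈ d.keys
      · exact hTzero q hq
      · exact hzero q hk)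
  rw [h1, ← h2]

-- the value of one dense number phase at a cell, as a sum
theorem pvNum_read (m k : Nat) (nums : List Int) (j : Nat) (g : Nat → Nat → Nat → Int)
    (q : Nat × Nat × Nat) :
    pvNumPhaseF m k nums j g q.1 q.2.1 q.2.2
      = (∑ carry ∈ Finset.range (m + 1), ∑ ones ∈ Finset.range (k + 1),
          ∑ s ∈ Finset.range (m + 1), ∑ c ∈ Finset.range (m - s + 1),
          if (¬ g carry ones s = 0 ∧ ¬ k < ones + (c + carry) % 2 ∧
              ((c + carry) / 2, ones + (c + carry) % 2, s + c) = q)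
          then g carry ones s * pvInvf m (m - c) % pvMod * pvPw nums j c % pvMod else 0) % pvMod := by
  unfold pvNumPhaseF
  rw [List.foldl_ext _ (fun nd carry =>
      (List.range (k + 1)).foldl (fun nd ones =>
        (List.range (m + 1)).foldl (fun nd s =>
          (List.range (m - s + 1)).foldl (fun nd c =>
            if (¬ g carry ones s = 0 ∧ ¬ k < ones + (c + carry) % 2) then
              pvUpdF ((c + carry) / 2, ones + (c + carry) % 2, s + c)
                (g carry ones s * pvInvf m (m - c) % pvMod * pvPw nums j c % pvMod) nd
            else nd) nd) nd) nd) _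
    (by
      intro nd carry _
      refine List.foldl_ext _ _ _ fun nd ones _ => ?_
      refine List.foldl_ext _ _ _ fun nd s _ => ?_
      dsimp only
      by_cases hv : g carry ones s = 0
      · rw [if_pos hv,
          List.foldl_ext _ (fun (x : Nat → Nat → Nat → Int) (_ : Nat) => x) _
            (by intro x c _; rw [if_neg (by tauto)]),
          pvFoldlConst]
      · rw [if_neg hv]
        refine List.foldl_ext _ _ _ fun x c _ => ?_
        by_cases hno : k < ones + (c + carry) % 2
        · rw [if_pos hno, if_neg (by tauto)]
        · rw [if_neg hno, if_pos ⟨hv, hno⟩])]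
  rw [pvFoldNest, pvFoldNest, pvFoldNest]
  rw [pvFoldUpd_read (ι := ((Nat × Nat) × Nat) × Nat)
      (P := fun p => ¬ g p.1.1.1 p.1.1.2 p.1.2 = 0 ∧ ¬ k < p.1.1.2 + (p.2 + p.1.1.1) % 2)
      (key := fun p => ((p.2 + p.1.1.1) / 2, p.1.1.2 + (p.2 + p.1.1.1) % 2, p.1.2 + p.2))
      (v := fun p => g p.1.1.1 p.1.1.2 p.1.2 * pvInvf m (m - p.2) % pvMod * pvPw nums j p.2 % pvMod)
      (g₀ := pvZeroF) (a := q.1) (b := q.2.1) (c := q.2.2) _ (Int.zero_emod _)]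
  rw [show pvZeroF q.1 q.2.1 q.2.2 = 0 from rfl, zero_add]
  congr 1
  rw [pvSumMapFlatMap]
  simp only [List.map_map, Function.comp_def, pvSumMapFlatMap, pvSumMapRange]
  refine Finset.sum_congr rfl fun carry _ => Finset.sum_congr rfl fun ones _ =>
    Finset.sum_congr rfl fun s _ => Finset.sum_congr rfl fun c _ => ?_
  refine if_congr ?_ rfl rfl
  rw [← pvMk3 q, Prod.mk.injEq, Prod.mk.injEq]
  tauto

-- one sparse phase computes the dense number phase, pointwise
theorem pvPhaseB_sim (m k : Nat) (nums : List Int) (j : Nat)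
    (d : PySem.Dict (Nat × Nat × Nat) Int) (g : Nat → Nat → Nat → Int)
    (hnd : d.keys.Nodup) (hfun : ∀ q : Nat × Nat × Nat, d.getD q 0 = g q.1 q.2.1 q.2.2)
    (hbox : pvBoxP m k g) (q : Nat × Nat × Nat) :
    (pvPhaseB m k nums j d).getD q 0 = pvNumPhaseF m k nums j g q.1 q.2.1 q.2.2 := by
  rw [pvPhaseB_read, pvNum_read]
  congr 1
  have hmap : ∀ it : (Nat × Nat × Nat) × Int,
      ((List.range (m - it.1.2.2 + 1)).map (fun c =>
        if (¬ k < it.1.2.1 + (c + it.1.1) % 2 ∧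
            ((c + it.1.1) / 2, it.1.2.1 + (c + it.1.1) % 2, it.1.2.2 + c) = q)
        then it.2 * pvInvf m (m - c) % pvMod * pvPw nums j c % pvMod else 0)).sum
      = ∑ c ∈ Finset.range (m - it.1.2.2 + 1),
          if (¬ k < it.1.2.1 + (c + it.1.1) % 2 ∧
              ((c + it.1.1) / 2, it.1.2.1 + (c + it.1.1) % 2, it.1.2.2 + c) = q)
          then it.2 * pvInvf m (m - c) % pvMod * pvPw nums j c % pvMod else 0 :=
    fun it => pvSumMapRange _ _
  rw [List.map_congr_left (fun it _ => hmap it)]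
  rw [pvSumItemsBox m k d g hnd hfun hbox
      (H := fun q0 v => ∑ c ∈ Finset.range (m - q0.2.2 + 1),
        if (¬ k < q0.2.1 + (c + q0.1) % 2 ∧
            ((c + q0.1) / 2, q0.2.1 + (c + q0.1) % 2, q0.2.2 + c) = q)
        then v * pvInvf m (m - c) % pvMod * pvPw nums j c % pvMod else 0)
      (by
        intro q0
        refine Finset.sum_eq_zero fun c _ => ?_
        split <;> simp)]
  refine Finset.sum_congr rfl fun carry _ => Finset.sum_congr rfl fun ones _ =>
    Finset.sum_congr rfl fun s _ => ?_
  by_cases hv : g carry ones s = 0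
  · rw [hv]
    rw [Finset.sum_eq_zero fun c _ => by split <;> simp]
    rw [Finset.sum_eq_zero fun c _ => by rw [if_neg (by tauto)]]
  · refine Finset.sum_congr rfl fun c _ => ?_
    refine if_congr ?_ rfl rfl
    rw [Nat.add_comm s c]
    tauto

-- nodup keys survive a sparse phase
theorem pvPhaseB_nodup (m k : Nat) (nums : List Int) (j : Nat)
    (d : PySem.Dict (Nat × Nat × Nat) Int) :
    (pvPhaseB m k nums j d).keys.Nodup := by
  unfold pvPhaseB
  refine pvFoldPres (fun d : PySem.Dict (Nat × Nat × Nat) Int => d.keys.Nodup) _ _ _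
    PySem.Dict.nodup_keys_empty ?_
  intro nd it _ hnd
  refine pvFoldPres (fun d : PySem.Dict (Nat × Nat × Nat) Int => d.keys.Nodup) _ _ _ hnd ?_
  intro nd c _ hnd
  dsimp only
  split
  · exact hnd
  · exact PySem.Dict.nodup_keys_insert _ _ _ hnd

-- the sparse phases track the dense number phases
theorem pvSimB (m k : Nat) (nums : List Int) :
    ∀ (l : List Nat) (d : PySem.Dict (Nat × Nat × Nat) Int) (g : Nat → Nat → Nat → Int),
      d.keys.Nodup → (∀ q : Nat × Nat × Nat, d.getD q 0 = g q.1 q.2.1 q.2.2) → pvBoxP m k g →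
      (l.foldl (fun d j => pvPhaseB m k nums j d) d).keys.Nodup ∧
      (∀ q : Nat × Nat × Nat,
        (l.foldl (fun d j => pvPhaseB m k nums j d) d).getD q 0
          = (l.foldl (fun g j => pvNumPhaseF m k nums j g) g) q.1 q.2.1 q.2.2) ∧
      pvBoxP m k (l.foldl (fun g j => pvNumPhaseF m k nums j g) g) := by
  intro l
  induction l with
  | nil => exact fun d g hnd hfun hbox => ⟨hnd, hfun, hbox⟩
  | cons j l ih =>
    intro d g hnd hfun hbox
    simp only [List.foldl_cons]
    exact ih _ _ (pvPhaseB_nodup m k nums j d)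
      (pvPhaseB_sim m k nums j d g hnd hfun hbox) (pvBox_numPhase m k nums j g)

-- the closed-form readout over the final dict equals pvE
theorem pvAnsB (m k : Nat) (d : PySem.Dict (Nat × Nat × Nat) Int) (g : Nat → Nat → Nat → Int)
    (hnd : d.keys.Nodup) (hfun : ∀ q : Nat × Nat × Nat, d.getD q 0 = g q.1 q.2.1 q.2.2)
    (hbox : pvBoxP m k g) :
    d.items.foldl (fun ans it =>
        if it.1.2.2 = m ∧ it.1.2.1 + PySem.Int.bitCount (↑it.1.1 : Int) = k
        then (ans + it.2) % pvMod else ans) 0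
      = pvE m k g % pvMod := by
  rw [pvFoldAdd _ (fun it : (Nat × Nat × Nat) × Int =>
      it.1.2.2 = m ∧ it.1.2.1 + PySem.Int.bitCount (↑it.1.1 : Int) = k)
      (fun it => it.2) 0 (Int.zero_emod _), zero_add]
  congr 1
  rw [pvSumItemsBox m k d g hnd hfun hbox
      (H := fun q0 v => if q0.2.2 = m ∧ q0.2.1 + PySem.Int.bitCount (↑q0.1 : Int) = k then v else 0)
      (by intro q0; dsimp only; split <;> rfl)]
  unfold pvE
  refine Finset.sum_congr rfl fun a _ => Finset.sum_congr rfl fun b _ => ?_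
  rw [show (∑ c ∈ Finset.range (m + 1),
        if c = m ∧ b + PySem.Int.bitCount (↑a : Int) = k then g a b c else 0)
      = ∑ c ∈ Finset.range (m + 1),
        if (b + PySem.Int.bitCount (↑a : Int) = k) ∧ c = m then g a b c else 0 from
    Finset.sum_congr rfl fun c _ => if_congr (by tauto) rfl rfl]
  exact pvSumCollapse (m + 1) m (by omega) _ _

-- ===== VERDICT =====
theorem magicalSum_spec : Claim_equal_magicalSum := by
  intro M K nums hdom hpre
  obtain ⟨hM, hK⟩ := hpre
  unfold Spec_magicalSum
  simp only [magicalSum, magicalSum_alt]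
  rw [pvFactB_eq, pvModB_eq]
  set m := M.toNat with hm
  set k := K.toNat with hk2
  set n := nums.length with hn
  set t := max (PySem.Int.bitLength M) 1 with ht
  -- replace A's list DP by its function-space mirror
  have hstepA : ∀ (tb : List (List (List Int))) (j : Nat), j ∈ List.range (n + t) →
      pvDims m k tb →
      pvDims m k (if j < n then pvNumPhase m k nums j tb else pvTailPhase m k tb) ∧
      pvA (if j < n then pvNumPhase m k nums j tb else pvTailPhase m k tb)
        = (if j < n then pvNumPhaseF m k nums j (pvA tb) else pvTailPhaseF m k (pvA tb)) := by
    intro tb j _ htb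
    by_cases hj : j < n
    · simpa [hj] using pvNumPhase_sim m k nums j tb
    · simpa [hj] using pvTailPhase_sim m k tb
  have simA := pvSimFold m k (List.range (n + t))
    (fun dp j => if j < n then pvNumPhase m k nums j dp else pvTailPhase m k dp)
    (fun dp j => if j < n then pvNumPhaseF m k nums j dp else pvTailPhaseF m k dp)
    hstepA (pvInit m k) (pvDims_init m k)
  have hAread : pvGet ((List.range (n + t)).foldl
      (fun dp j => if j < n then pvNumPhase m k nums j dp else pvTailPhase m k dp) (pvInit m k))
      0 k m
      = ((List.range (n + t)).foldl
        (fun dp j => if j < n then pvNumPhaseF m k nums j dp else pvTailPhaseF m k dp) pvInitF)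
        0 k m := by
    have h2 := simA.2
    rw [pvA_init] at h2
    exact congrFun (congrFun (congrFun h2 0) k) m
  rw [hAread]
  have hsplit : (List.range (n + t)).foldl
      (fun dp j => if j < n then pvNumPhaseF m k nums j dp else pvTailPhaseF m k dp) pvInitF
      = (pvTailPhaseF m k)^[t] ((List.range n).foldl (fun dp j => pvNumPhaseF m k nums j dp) pvInitF) := by
    rw [List.range_add, List.foldl_append, List.foldl_map]
    rw [List.foldl_ext _ (fun dp j => pvNumPhaseF m k nums j dp) pvInitF
      (fun g j hj => by rw [if_pos (List.mem_range.1 hj)])]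
    rw [List.foldl_ext _ (fun dp (_ : Nat) => pvTailPhaseF m k dp) _
      (fun g i _ => by rw [if_neg (by omega)])]
    rw [pvIter]
  rw [hsplit]
  set G := (List.range n).foldl (fun dp j => pvNumPhaseF m k nums j dp) pvInitF with hG
  have hRB : pvRB m G := by
    rw [hG]
    exact pvFoldPres (pvRB m) _ _ _ (pvRB_init m) (fun g j _ _ => pvRB_numPhase m k nums j g)
  have hmlt : m < 2 ^ t := by
    have h1 := PySem.Int.lt_two_pow_bitLength M
    have h2 : (2 : Nat) ^ PySem.Int.bitLength M ≤ 2 ^ t :=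
      Nat.pow_le_pow_right (by omega) (le_max_left _ _)
    have h3 : M.natAbs = m := by omega
    omega
  have hZ : ∀ a b c, 2 ^ t ≤ a ∨ m < a → G a b c = 0 := by
    intro a b c hab
    refine hRB.2 a b c ?_
    rcases hab with h | h
    · omega
    · exact h
  rw [pvML m k t G hRB.1 hZ]
  -- B's side: the sparse dict fold tracks G
  have hfun0 : ∀ q : Nat × Nat × Nat,
      ((PySem.Dict.empty : PySem.Dict (Nat × Nat × Nat) Int).insert (0, 0, 0) 1).getD q 0
        = pvInitF q.1 q.2.1 q.2.2 := by
    intro q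
    rw [PySem.Dict.getD_insert]
    unfold pvInitF
    rw [pvMk3 q]
    split <;> simp_all
  have hsim := pvSimB m k nums (List.range n)
    ((PySem.Dict.empty : PySem.Dict (Nat × Nat × Nat) Int).insert (0, 0, 0) 1) pvInitF
    (PySem.Dict.nodup_keys_insert _ _ _ PySem.Dict.nodup_keys_empty) hfun0 (pvBox_init m k)
  rw [pvAnsB m k _ G hsim.1 hsim.2.1 hsim.2.2]
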